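-- pv_equiv track=rewrite | github.com/joeShuff/discord-RPGSteveBot | db/db_controller.py | get_modifier
-- ===== SOURCE A (Python) =====
-- def get_modifier(value):
--     modifiers = {
--         80: -5,
--         70: -4,
--         60: -3,
--         50: -2,
--         40: -1
--     }
--
--     while value not in modifiers.keys():
--         value -= 1
--
--         if value == 0:
--             return 0
--
--     chosen = modifiers[value]
--     return chosen
-- ===== SOURCE B (Python) =====
-- def get_modifier(value):
--     if value >= 80:
--         return -5
--     if value >= 70:
--         return -4
--     if value >= 60:
--         return -3
--     if value >= 50:
--         return -2
--     if value >= 40: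
--         return -1
--     return 0
-- ===== Notes on version B (the rewrite author's own statement) =====
-- stated objective: faster
-- what changed: Replaces A's decrement-until-key-hit while loop with a direct threshold chain selecting the largest tier <= value (constant time); Pre_ excludes value <= 0, where A's loop never terminates.
-- outside the precondition, e.g. on get_modifier(0): A does not finish within the time limit, B returns 0
import Mathlib
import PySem

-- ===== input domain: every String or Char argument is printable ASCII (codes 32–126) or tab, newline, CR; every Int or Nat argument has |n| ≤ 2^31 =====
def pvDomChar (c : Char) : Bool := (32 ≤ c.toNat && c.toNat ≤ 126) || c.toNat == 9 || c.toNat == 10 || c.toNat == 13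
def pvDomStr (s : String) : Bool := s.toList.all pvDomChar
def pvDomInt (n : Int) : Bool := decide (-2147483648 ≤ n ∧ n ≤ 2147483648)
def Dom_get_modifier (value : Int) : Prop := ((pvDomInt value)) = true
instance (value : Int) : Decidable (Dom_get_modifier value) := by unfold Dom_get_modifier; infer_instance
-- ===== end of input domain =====

-- B replaces A's decrement-until-key-hit while loop with a constant-time threshold chain (faster, asymptotic).


-- ===== PORT A =====
-- the literal dict of A
def get_modifier_modifiers : PySem.Dict Int Int :=
  PySem.Dict.ofList [(80, -5), (70, -4), (60, -3), (50, -2), (40, -1)]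

-- the while loop of A; fuel only makes the loop total (value.toNat steps suffice when value ≥ 1)
def get_modifier_loop : Nat → Int → Int
  | 0, v => (PySem.Dict.get? get_modifier_modifiers v).getD 0
  | f + 1, v =>
    match PySem.Dict.get? get_modifier_modifiers v with
    | some chosen => chosen
    | none =>
      let v' := v - 1
      if v' = 0 then 0 else get_modifier_loop f v'

def get_modifier (value : Int) : Int :=
  get_modifier_loop value.toNat value

-- ===== PORT B =====
def get_modifier_alt (value : Int) : Int :=
  if value ≥ 80 then -5
  else if value ≥ 70 then -4
  else if value ≥ 60 then -3
  else if value ≥ 50 then -2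
  else if value ≥ 40 then -1
  else 0

-- ===== PRECONDITION & SPEC =====
-- Pre_ excludes value ≤ 0, on which A's while loop never terminates (it decrements past 0 forever).
def Pre_get_modifier (value : Int) : Prop := 1 ≤ value
instance (value : Int) : Decidable (Pre_get_modifier value) := by unfold Pre_get_modifier; infer_instance
def pvWitness_get_modifier : Int := 75

def Spec_get_modifier (value : Int) (out : Int) : Prop := out = get_modifier_alt value
instance (value : Int) (out : Int) : Decidable (Spec_get_modifier value out) := by unfold Spec_get_modifier; infer_instance

-- ===== CLAIM =====
def Claim_equal_get_modifier : Prop := ∀ (value : Int), Dom_get_modifier value → Pre_get_modifier value → Spec_get_modifier value (get_modifier value)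

-- ===== LEMMAS AND PROOFS =====

-- get? on A's literal dict, as an if-chain
lemma get_modifier_get?_eq (v : Int) : PySem.Dict.get? get_modifier_modifiers v =
    if (80 : Int) = v then some (-5) else if (70 : Int) = v then some (-4)
    else if (60 : Int) = v then some (-3) else if (50 : Int) = v then some (-2)
    else if (40 : Int) = v then some (-1) else none := by
  have h : get_modifier_modifiers =
      PySem.Dict.mk [(80, -5), (70, -4), (60, -3), (50, -2), (40, -1)] := by decide
  rw [h]
  simp only [PySem.Dict.get?_mk_cons, beq_iff_eq,
    show (PySem.Dict.mk ([] : List (Int × Int))).get? v = none from rfl]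

lemma get_modifier_loop_eq_alt : ∀ (f : Nat) (v : Int), 1 ≤ v → v ≤ (f : Int) →
    get_modifier_loop f v = get_modifier_alt v := by
  intro f
  induction f with
  | zero => intro v h1 h2; omega
  | succ f ih =>
    intro v h1 h2
    rw [get_modifier_loop, get_modifier_get?_eq]
    split_ifs with h80 h70 h60 h50 h40
    · subst h80; norm_num [get_modifier_alt]
    · subst h70; norm_num [get_modifier_alt]
    · subst h60; norm_num [get_modifier_alt]
    · subst h50; norm_num [get_modifier_alt]
    · subst h40; norm_num [get_modifier_alt]
    · -- no key matches: one decrement step of the while loop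
      simp only
      by_cases hv1 : v - 1 = 0
      · rw [if_pos hv1]
        unfold get_modifier_alt
        split_ifs <;> omega
      · rw [if_neg hv1, ih (v - 1) (by omega) (by push_cast at h2 ⊢; omega)]
        unfold get_modifier_alt
        split_ifs <;> omega

-- ===== VERDICT =====
theorem get_modifier_spec : Claim_equal_get_modifier := by
  intro v hdom hpre
  unfold Spec_get_modifier get_modifier
  exact get_modifier_loop_eq_alt v.toNat v hpre (by omega)
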